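-- pv_equiv track=rewrite | github.com/ryanbrown919/CHECKMATE | scripts/gantryControl.py | parse_path_to_movement
-- ===== SOURCE A (Python) =====
-- STEP_MM = 25  # each step is 25mm
--
-- def parse_path_to_movement(points):
--     """
--     Given a list of absolute points [(x, y), ...], this function returns a new list where:
--     - The first element is the original starting point.
--     - Each subsequent element is the relative displacement from that starting point,
--         with colinear segments merged into a single vector.
--
--     For example:
--     Absolute points: [(0,300), (25,275), (50,300), (75,275)]
--     After normalization (subtracting starting point (0,300)):
--         [(0,0), (25,-25), (50,0), (75,-25)]
--     Differences between normalized points: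
--         (25,-25), (25,25), (25,-25)
--     Merging colinear segments (if applicable) and then
--     computing cumulative relative positions gives:
--         [(0,0), (25,-25), (50,0), (25,-25)]
--     Finally, the function outputs:
--         [(0,300), (25,-25), (50,0), (25,-25)]
--
--     """
--     if not points or len(points) < 2:
--         return points
--
--     if points[1][0] % 25 == 0 or points[1][1] % 25 ==0:
--         return points
--     else:
--         points = [(x * STEP_MM, y * STEP_MM) for (x, y) in points]
--
--     # Save the absolute starting point.
--     base = points[0]
--
--     # Convert all points into relative coordinates, so that the start is (0,0).
--     rel_points = [(p[0] - base[0], p[1] - base[1]) for p in points]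
--
--     # Compute differences between consecutive relative points.
--     diffs = []
--     for i in range(1, len(rel_points)):
--         dx = rel_points[i][0] - rel_points[i - 1][0]
--         dy = rel_points[i][1] - rel_points[i - 1][1]
--         diffs.append((dx, dy))
--
--     # Helper to check if two vectors are colinear and in the same direction.
--     def same_direction(v1, v2):
--         # Cross product: if nonzero, vectors are not colinear.
--         cross = v1[0] * v2[1] - v1[1] * v2[0]
--         if cross != 0:
--             return False
--         # Dot product > 0 ensures they're pointing in the same direction.
--         return (v1[0] * v2[0] + v1[1] * v2[1]) > 0
--
--     # Merge consecutive differences if they are colinear.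
--     merged = []
--     current = diffs[0]
--     for d in diffs[1:]:
--         if same_direction(current, d):
--             # Sum the two differences.
--             current = (current[0] + d[0], current[1] + d[1])
--         else:
--             merged.append(current)
--             current = d
--     merged.append(current)
--
--     # Rebuild the cumulative relative positions from the merged differences.
--     cumulative = [(0, 0)]
--     current_pos = (0, 0)
--     for d in merged:
--         current_pos = (current_pos[0] + d[0], current_pos[1] + d[1])
--         cumulative.append(current_pos)
--
--     # The final output:
--     # The first element is the original absolute starting point.
--     # Every subsequent element is the relative movement from the starting point.
--     final_points = [base] + cumulative[1:]
--     return final_points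
-- ===== SOURCE B (Python) =====
-- STEP_MM = 25  # each step is 25mm
--
-- def parse_path_to_movement(points):
--     if not points or len(points) < 2:
--         return points
--     if points[1][0] % 25 == 0 or points[1][1] % 25 == 0:
--         return points
--     base = (points[0][0] * STEP_MM, points[0][1] * STEP_MM)
--     prev = (points[1][0] * STEP_MM, points[1][1] * STEP_MM)
--     run = (prev[0] - base[0], prev[1] - base[1])
--     out = [base]
--     for (x, y) in points[2:]:
--         p = (x * STEP_MM, y * STEP_MM)
--         seg = (p[0] - prev[0], p[1] - prev[1])
--         cross = run[0] * seg[1] - run[1] * seg[0]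
--         dot = run[0] * seg[0] + run[1] * seg[1]
--         if cross != 0 or dot <= 0:
--             # direction change: record the turning point (relative to base)
--             out.append((prev[0] - base[0], prev[1] - base[1]))
--             run = seg
--         else:
--             run = (run[0] + seg[0], run[1] + seg[1])
--         prev = p
--     out.append((prev[0] - base[0], prev[1] - base[1]))
--     return out
-- ===== Notes on version B (the rewrite author's own statement) =====
-- stated objective: simpler
-- what changed: Replaces A's four sequential passes (normalize to relative coordinates, build adjacent diffs, merge colinear diffs, re-accumulate cumulative positions) with a single sweep over the points that maintains the running direction vector and emits each turning point relative to the base.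
import Mathlib
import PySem

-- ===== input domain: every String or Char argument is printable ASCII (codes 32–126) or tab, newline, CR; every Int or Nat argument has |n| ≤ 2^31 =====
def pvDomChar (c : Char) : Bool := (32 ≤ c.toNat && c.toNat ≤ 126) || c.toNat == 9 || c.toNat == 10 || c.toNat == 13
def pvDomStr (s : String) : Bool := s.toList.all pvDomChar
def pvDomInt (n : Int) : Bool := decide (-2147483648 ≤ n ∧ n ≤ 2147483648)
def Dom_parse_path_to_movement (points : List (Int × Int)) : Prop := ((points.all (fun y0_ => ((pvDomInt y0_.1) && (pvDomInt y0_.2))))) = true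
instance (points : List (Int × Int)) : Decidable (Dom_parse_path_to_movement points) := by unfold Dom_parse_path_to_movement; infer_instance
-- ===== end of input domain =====

-- B replaces A's four passes (normalize, adjacent diffs, merge colinear diffs, re-accumulate)
-- with a single turning-point sweep over the points; objective: simpler.

-- ===== PORT A =====
def STEP_MM : Int := 25

-- differences between consecutive points (Python's `for i in range(1, len)` loop)
def adjDiffs : List (Int × Int) → List (Int × Int)
  | a :: b :: rest => (b.1 - a.1, b.2 - a.2) :: adjDiffs (b :: rest)
  | _ => []

-- helper `same_direction` of A
def sameDirection (v1 v2 : Int × Int) : Bool :=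
  if v1.1 * v2.2 - v1.2 * v2.1 ≠ 0 then false
  else decide (v1.1 * v2.1 + v1.2 * v2.2 > 0)

-- A's merge loop over diffs[1:], state (merged, current)
def mergeLoop (current : Int × Int) (merged : List (Int × Int)) : List (Int × Int) → List (Int × Int)
  | [] => merged ++ [current]
  | d :: ds =>
    if sameDirection current d then mergeLoop (current.1 + d.1, current.2 + d.2) merged ds
    else mergeLoop d (merged ++ [current]) ds

-- A's cumulative loop; acc represents cumulative[1:] (the leading (0,0) is dropped by A)
def cumLoop (pos : Int × Int) (acc : List (Int × Int)) : List (Int × Int) → List (Int × Int)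
  | [] => acc
  | d :: ds => cumLoop (pos.1 + d.1, pos.2 + d.2) (acc ++ [(pos.1 + d.1, pos.2 + d.2)]) ds

def parse_path_to_movement (points : List (Int × Int)) : List (Int × Int) :=
  match points with
  | p0 :: p1 :: _ =>
    if PySem.Int.mod p1.1 25 == 0 || PySem.Int.mod p1.2 25 == 0 then points
    else
      let pts := points.map (fun q => (q.1 * STEP_MM, q.2 * STEP_MM))
      let base := (p0.1 * STEP_MM, p0.2 * STEP_MM)
      let rel := pts.map (fun q => (q.1 - base.1, q.2 - base.2))
      match adjDiffs rel with
      | [] => []  -- unreachable: len(points) ≥ 2 so diffs is nonempty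
      | d :: ds => base :: cumLoop (0, 0) [] (mergeLoop d [] ds)
  | _ => points   -- `not points or len(points) < 2`

-- ===== PORT B =====
-- B's single sweep: emit the turning points (relative to base), scaling each point as it is visited
def sweep (base run prev : Int × Int) : List (Int × Int) → List (Int × Int)
  | [] => [(prev.1 - base.1, prev.2 - base.2)]
  | q :: qs =>
    let p := (q.1 * STEP_MM, q.2 * STEP_MM)
    let seg := (p.1 - prev.1, p.2 - prev.2)
    if run.1 * seg.2 - run.2 * seg.1 ≠ 0 ∨ run.1 * seg.1 + run.2 * seg.2 ≤ 0 then
      (prev.1 - base.1, prev.2 - base.2) :: sweep base seg p qs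
    else
      sweep base (run.1 + seg.1, run.2 + seg.2) p qs

def parse_path_to_movement_alt (points : List (Int × Int)) : List (Int × Int) :=
  match points with
  | p0 :: p1 :: rest =>
    if PySem.Int.mod p1.1 25 == 0 || PySem.Int.mod p1.2 25 == 0 then points
    else
      let base := (p0.1 * STEP_MM, p0.2 * STEP_MM)
      let prev := (p1.1 * STEP_MM, p1.2 * STEP_MM)
      base :: sweep base (prev.1 - base.1, prev.2 - base.2) prev rest
  | _ => points

-- ===== PRECONDITION & SPEC =====
def Spec_parse_path_to_movement (points : List (Int × Int)) (out : List (Int × Int)) : Prop := out = parse_path_to_movement_alt points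
instance (points : List (Int × Int)) (out : List (Int × Int)) : Decidable (Spec_parse_path_to_movement points out) := by unfold Spec_parse_path_to_movement; infer_instance

-- ===== CLAIM (what is proved, stated in full; the proofs are below) =====
def Claim_equal_parse_path_to_movement : Prop := ∀ (points : List (Int × Int)), Dom_parse_path_to_movement points → Spec_parse_path_to_movement points (parse_path_to_movement points)

-- ===== LEMMAS AND PROOFS =====

theorem mergeLoop_acc (ds : List (Int × Int)) : ∀ (current : Int × Int) (merged : List (Int × Int)),
    mergeLoop current merged ds = merged ++ mergeLoop current [] ds := by
  induction ds with
  | nil => intro c m; simp [mergeLoop]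
  | cons d ds ih =>
    intro c m
    simp only [mergeLoop]
    split
    · exact ih _ _
    · rw [ih d (m ++ [c]), ih d ([] ++ [c])]; simp

theorem cumLoop_acc (ds : List (Int × Int)) : ∀ (pos : Int × Int) (acc : List (Int × Int)),
    cumLoop pos acc ds = acc ++ cumLoop pos [] ds := by
  induction ds with
  | nil => intro p a; simp [cumLoop]
  | cons d ds ih =>
    intro p a
    simp only [cumLoop]
    rw [ih _ (a ++ [_]), ih _ ([] ++ [_])]; simp

theorem adjDiffs_map_sub (b : Int × Int) : ∀ (l : List (Int × Int)),
    adjDiffs (l.map (fun q => (q.1 - b.1, q.2 - b.2))) = adjDiffs l := by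
  intro l
  induction l with
  | nil => simp [adjDiffs]
  | cons a t ih =>
    cases t with
    | nil => simp [adjDiffs]
    | cons c r =>
      simp only [List.map] at ih ⊢
      simp only [adjDiffs] at ih ⊢
      rw [ih]; ring_nf

-- core: A's merge-then-accumulate over the diffs of (prev :: scaled qs) equals B's sweep
theorem core (qs : List (Int × Int)) : ∀ (run prev base pos : Int × Int),
    pos.1 + run.1 = prev.1 - base.1 → pos.2 + run.2 = prev.2 - base.2 →
    cumLoop pos []
        (mergeLoop run [] (adjDiffs (prev :: qs.map (fun q => (q.1 * STEP_MM, q.2 * STEP_MM)))))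
      = sweep base run prev qs := by
  induction qs with
  | nil =>
    intro run prev base pos h1 h2
    simp [adjDiffs, mergeLoop, cumLoop, sweep, h1, h2]
  | cons q qs ih =>
    intro run prev base pos h1 h2
    simp only [List.map, adjDiffs, mergeLoop, sweep]
    by_cases hsd : sameDirection run (q.1 * STEP_MM - prev.1, q.2 * STEP_MM - prev.2) = true
    · have hcond : ¬ (run.1 * (q.2 * STEP_MM - prev.2) - run.2 * (q.1 * STEP_MM - prev.1) ≠ 0 ∨
          run.1 * (q.1 * STEP_MM - prev.1) + run.2 * (q.2 * STEP_MM - prev.2) ≤ 0) := by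
        unfold sameDirection at hsd
        split at hsd
        · simp at hsd
        · rename_i hc
          intro h
          rcases h with h | h
          · exact h (not_ne_iff.mp hc)
          · exact absurd h (not_le.mpr (of_decide_eq_true hsd))
      rw [if_pos hsd, if_neg hcond]
      exact ih _ _ base pos (by simp only [STEP_MM] at *; omega) (by simp only [STEP_MM] at *; omega)
    · have hcond : (run.1 * (q.2 * STEP_MM - prev.2) - run.2 * (q.1 * STEP_MM - prev.1) ≠ 0 ∨
          run.1 * (q.1 * STEP_MM - prev.1) + run.2 * (q.2 * STEP_MM - prev.2) ≤ 0) := by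
        unfold sameDirection at hsd
        split at hsd
        · left; assumption
        · right; simpa using hsd
        
      rw [if_neg hsd, if_pos hcond]
      rw [mergeLoop_acc]
      simp only [List.nil_append, List.singleton_append]
      rw [show cumLoop pos []
            ((run :: mergeLoop (q.1 * STEP_MM - prev.1, q.2 * STEP_MM - prev.2) [] (adjDiffs ((q.1 * STEP_MM, q.2 * STEP_MM) :: qs.map (fun q => (q.1 * STEP_MM, q.2 * STEP_MM))))))
          = (pos.1 + run.1, pos.2 + run.2) :: cumLoop (pos.1 + run.1, pos.2 + run.2) []
              (mergeLoop (q.1 * STEP_MM - prev.1, q.2 * STEP_MM - prev.2) [] (adjDiffs ((q.1 * STEP_MM, q.2 * STEP_MM) :: qs.map (fun q => (q.1 * STEP_MM, q.2 * STEP_MM)))))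
          from by rw [cumLoop]; rw [cumLoop_acc]; simp]
      rw [h1, h2]
      congr 1
      exact ih _ _ base (prev.1 - base.1, prev.2 - base.2) (by simp; try ring) (by simp; try ring)

-- ===== VERDICT (by name: the statement is the Claim_ definition above) =====
theorem parse_path_to_movement_spec : Claim_equal_parse_path_to_movement := by
  intro points _
  unfold Spec_parse_path_to_movement parse_path_to_movement parse_path_to_movement_alt
  match points with
  | [] => rfl
  | [p] => rfl
  | p0 :: p1 :: rest =>
    simp only
    split
    · rfl
    · rw [adjDiffs_map_sub ((p0.1 * STEP_MM, p0.2 * STEP_MM))]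
      simp only [List.map, adjDiffs]
      exact congrArg (List.cons _) (core rest _ _ _ _ (by simp) (by simp))
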